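-- pv_equiv track=rewrite | github.com/mikolajjuda/rownowaznosc-cykliczna-referat | implementacje/pattern_matching.py | rownowazne_cyklicznie
-- ===== SOURCE A (Python) =====
-- def rownowazne_cyklicznie(A: list, B: list) -> bool:
--     if len(A) != len(B):
--         return False
--     n = len(A)
--
--     pmt = [0] * n
--     for i in range(1, n):
--         k = pmt[i - 1]
--         while k > 0 and B[i] != B[k]:
--             k = pmt[k - 1]
--         if B[i] == B[k]:
--             k += 1
--         pmt[i] = k
--
--     j=0
--     for i in range(2*n):
--         while j>0 and A[i%n] != B[j]:
--             j = pmt[j-1]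
--         if A[i%n] == B[j]:
--             if j == n-1:
--                 return True
--             j += 1
--
--     return False
-- ===== SOURCE B (Python) =====
-- def rownowazne_cyklicznie(A: list, B: list) -> bool:
--     if len(A) != len(B):
--         return False
--     return any(A[i:] + A[:i] == B for i in range(len(A)))
-- ===== Notes on version B (the rewrite author's own statement) =====
-- stated objective: simpler
-- what changed: Replaced the hand-written KMP failure-table construction and scan over the doubled text by a one-line enumeration of all rotations A[i:]+A[:i] compared directly to B.
import Mathlib
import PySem

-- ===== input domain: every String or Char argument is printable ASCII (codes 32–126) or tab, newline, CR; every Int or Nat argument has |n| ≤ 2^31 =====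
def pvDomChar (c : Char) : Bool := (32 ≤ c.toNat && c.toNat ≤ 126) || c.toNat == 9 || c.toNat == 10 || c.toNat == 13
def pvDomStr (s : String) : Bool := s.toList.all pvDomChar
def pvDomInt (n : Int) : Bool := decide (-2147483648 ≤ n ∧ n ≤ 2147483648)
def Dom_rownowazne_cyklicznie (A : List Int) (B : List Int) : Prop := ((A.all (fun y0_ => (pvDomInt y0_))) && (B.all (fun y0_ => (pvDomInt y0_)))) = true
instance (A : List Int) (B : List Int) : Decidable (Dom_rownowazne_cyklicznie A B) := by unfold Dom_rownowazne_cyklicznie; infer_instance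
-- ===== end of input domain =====

-- B replaces A's KMP failure-table + doubled-text scan by directly enumerating all
-- rotations A[i:]+A[:i] and comparing each to B (simpler, not faster: O(n^2) vs O(n)).

-- ===== PORT A =====
-- Python: `while k > 0 and B[i] != B[k]: k = pmt[k-1]`  (c = B[i]).
-- The `else k'` branch of the inner dite is only a totality guard: for the pmt the
-- algorithm builds, pmt[k-1] < k always holds, so that branch is never taken.
def pvJump (Bv : List Int) (pmt : List Nat) (c : Int) (k : Nat) : Nat :=
  if _h : 0 < k ∧ Bv.getD k 0 ≠ c then
    if _h2 : pmt.getD (k - 1) 0 < k then pvJump Bv pmt c (pmt.getD (k - 1) 0)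
    else pmt.getD (k - 1) 0
  else k
termination_by k

-- Python: `pmt = [0]*n; for i in range(1, n): k = pmt[i-1]; <while>; if B[i]==B[k]: k += 1; pmt[i] = k`
def pvBuildPmt (Bv : List Int) (n : Nat) : List Nat :=
  (List.range' 1 (n - 1)).foldl
    (fun pmt i =>
      let k := pvJump Bv pmt (Bv.getD i 0) (pmt.getD (i - 1) 0)
      let k := if Bv.getD i 0 = Bv.getD k 0 then k + 1 else k
      pmt.set i k)
    (List.replicate n 0)

-- Python: `j = 0; for i in range(2*n): <while>; if A[i%n] == B[j]: if j == n-1: return True; j += 1; return False`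
def pvSearch (Av Bv : List Int) (pmt : List Nat) (n : Nat) (i j : Nat) : Bool :=
  if _h : i < 2 * n then
    if Av.getD (i % n) 0 = Bv.getD (pvJump Bv pmt (Av.getD (i % n) 0) j) 0 then
      if pvJump Bv pmt (Av.getD (i % n) 0) j = n - 1 then true
      else pvSearch Av Bv pmt n (i + 1) (pvJump Bv pmt (Av.getD (i % n) 0) j + 1)
    else pvSearch Av Bv pmt n (i + 1) (pvJump Bv pmt (Av.getD (i % n) 0) j)
  else false
termination_by 2 * n - i

def rownowazne_cyklicznie (A : List Int) (B : List Int) : Bool :=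
  if A.length ≠ B.length then false
  else pvSearch A B (pvBuildPmt B A.length) A.length 0 0

-- ===== PORT B =====
def rownowazne_cyklicznie_alt (A : List Int) (B : List Int) : Bool :=
  if A.length ≠ B.length then false
  else (List.range A.length).any (fun i => (A.drop i ++ A.take i) == B)

-- ===== PRECONDITION & SPEC =====
def Spec_rownowazne_cyklicznie (A : List Int) (B : List Int) (out : Bool) : Prop := out = rownowazne_cyklicznie_alt A B
instance (A : List Int) (B : List Int) (out : Bool) : Decidable (Spec_rownowazne_cyklicznie A B out) := by unfold Spec_rownowazne_cyklicznie; infer_instance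

-- ===== CLAIM (what is proved, stated in full; the proofs are below) =====
def Claim_equal_rownowazne_cyklicznie : Prop := ∀ (A : List Int) (B : List Int), Dom_rownowazne_cyklicznie A B → Spec_rownowazne_cyklicznie A B (rownowazne_cyklicznie A B)

-- ===== LEMMAS AND PROOFS =====

-- `bf Bv m` = length of the longest proper border of `Bv.take m` (the KMP failure value).
def bf (Bv : List Int) (m : Nat) : Nat :=
  Nat.findGreatest (fun k => Bv.take k <:+ Bv.take m) (m - 1)

theorem bf_le (Bv : List Int) (m : Nat) : bf Bv m ≤ m - 1 :=
  Nat.findGreatest_le _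

theorem bf_suffix (Bv : List Int) (m : Nat) : Bv.take (bf Bv m) <:+ Bv.take m := by
  unfold bf
  exact Nat.findGreatest_spec (P := fun k => Bv.take k <:+ Bv.take m) (Nat.zero_le _) (by simp)

theorem bf_greatest (Bv : List Int) (m k : Nat) (hk : k ≤ m - 1)
    (h : Bv.take k <:+ Bv.take m) : k ≤ bf Bv m := Nat.le_findGreatest hk h

-- take (i+1) as take i ++ [getD i]
theorem take_succ_getD (l : List Int) (i : Nat) (h : i < l.length) :
    l.take (i + 1) = l.take i ++ [l.getD i 0] := by
  rw [List.take_add_one, List.getD_eq_getElem?_getD]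
  simp [List.getElem?_eq_getElem h]

theorem suffix_concat (l t : List Int) (c : Int) (h : l <:+ t) :
    l ++ [c] <:+ t ++ [c] := by
  obtain ⟨s, rfl⟩ := h
  exact ⟨s, by simp⟩

theorem concat_suffix_iff (l t : List Int) (a c : Int) :
    l ++ [a] <:+ t ++ [c] ↔ a = c ∧ l <:+ t := by
  constructor
  · rintro ⟨s, hs⟩
    rw [← List.append_assoc] at hs
    have h2 := List.append_inj' hs (by simp)
    obtain ⟨h3, h4⟩ := h2
    refine ⟨by simpa using h4, s, h3⟩
  · rintro ⟨rfl, h⟩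
    exact suffix_concat _ _ _ h

theorem take_eq_nil_of_suffix_nil (Bv : List Int) (k : Nat) (hk : k ≤ Bv.length)
    (h : Bv.take k <:+ ([] : List Int)) : k = 0 := by
  have := List.eq_nil_of_suffix_nil h
  have hl : (Bv.take k).length = k := by simp [hk]
  rw [this] at hl
  simpa using hl.symm

-- pmt agrees with bf on indices 1..j
def GoodPmt (Bv : List Int) (pmt : List Nat) (j : Nat) : Prop :=
  ∀ m, 1 ≤ m → m ≤ j → pmt.getD (m - 1) 0 = bf Bv m

-- Main while-loop lemma: pvJump computes the border-descent step correctly.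
theorem jump_spec (Bv : List Int) (pmt : List Nat) (c : Int) (cap : Nat)
    (hcap : cap < Bv.length) :
    ∀ j, j < Bv.length → GoodPmt Bv pmt j →
    ∀ t : List Int, Bv.take j <:+ t →
    (∀ k, k ≤ cap → Bv.take k <:+ t → Bv.getD k 0 = c → k ≤ j) →
    (pvJump Bv pmt c j ≤ j) ∧
    ((Bv.getD (pvJump Bv pmt c j) 0 = c →
        Bv.take (pvJump Bv pmt c j + 1) <:+ t ++ [c] ∧
        (∀ k, k ≤ cap + 1 → Bv.take k <:+ t ++ [c] → k ≤ pvJump Bv pmt c j + 1)) ∧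
     (Bv.getD (pvJump Bv pmt c j) 0 ≠ c →
        pvJump Bv pmt c j = 0 ∧
        (∀ k, k ≤ cap + 1 → Bv.take k <:+ t ++ [c] → k = 0))) := by
  intro j
  induction j using Nat.strong_induction_on with
  | _ j IH =>
    intro hj hgood t hsfx hmax
    rw [pvJump]
    by_cases hcond : 0 < j ∧ Bv.getD j 0 ≠ c
    · -- while-loop body: descend to k' = bf Bv j
      have hj1 : 1 ≤ j := hcond.1
      have hk' : pmt.getD (j - 1) 0 = bf Bv j := hgood j hj1 le_rfl
      have hbflt : bf Bv j < j := lt_of_le_of_lt (bf_le Bv j) (by omega)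
      rw [dif_pos hcond, hk', dif_pos hbflt]
      have hrec := IH (bf Bv j) hbflt (lt_trans hbflt hj)
        (fun m h1 h2 => hgood m h1 (le_trans h2 (le_of_lt hbflt))) t
        (List.IsSuffix.trans (bf_suffix Bv j) hsfx)
        (by
          intro k hk1 hk2 hk3
          have hkj : k ≤ j := hmax k hk1 hk2 hk3
          have hkne : k ≠ j := by
            intro h; exact hcond.2 (h ▸ hk3)
          have hklt : k < j := lt_of_le_of_ne hkj hkne
          -- k is a border of take j Bv
          have htj : Bv.take j <:+ t := hsfx
          have hlen : (Bv.take k).length ≤ (Bv.take j).length := by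
            simp only [List.length_take]
            omega
          have hkb : Bv.take k <:+ Bv.take j :=
            List.suffix_of_suffix_length_le hk2 htj hlen
          exact bf_greatest Bv j k (by omega) hkb)
      have hle : pvJump Bv pmt c (bf Bv j) ≤ bf Bv j := hrec.1
      exact ⟨le_trans hle (le_of_lt hbflt), hrec.2⟩
    · -- loop exits: result is j itself
      rw [dif_neg hcond]
      refine ⟨le_rfl, ?_, ?_⟩
      · intro hc
        constructor
        · rw [take_succ_getD Bv j hj, hc]
          exact suffix_concat _ _ _ hsfx
        · intro k hk1 hk2
          match k, hk2 with
          | 0, _ => omega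
          | (k' + 1), hk2 =>
            rw [take_succ_getD Bv k' (by omega)] at hk2
            rw [concat_suffix_iff] at hk2
            have := hmax k' (by omega) hk2.2 hk2.1
            omega
      · intro hc
        have hj0 : j = 0 := by
          by_contra h
          exact hc (by_contra fun h2 => hcond ⟨Nat.pos_of_ne_zero h, h2⟩)
        subst hj0
        refine ⟨rfl, ?_⟩
        intro k hk1 hk2
        match k, hk2 with
        | 0, _ => rfl
        | (k' + 1), hk2 =>
          rw [take_succ_getD Bv k' (by omega)] at hk2
          rw [concat_suffix_iff] at hk2
          have hk'0 : k' ≤ 0 := hmax k' (by omega) hk2.2 hk2.1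
          interval_cases k'
          exact absurd hk2.1 hc

-- the fold step of pvBuildPmt
def pvStep (Bv : List Int) (pmt : List Nat) (i : Nat) : List Nat :=
  let k := pvJump Bv pmt (Bv.getD i 0) (pmt.getD (i - 1) 0)
  let k := if Bv.getD i 0 = Bv.getD k 0 then k + 1 else k
  pmt.set i k

theorem pvBuildPmt_eq (Bv : List Int) (n : Nat) :
    pvBuildPmt Bv n = (List.range' 1 (n - 1)).foldl (pvStep Bv) (List.replicate n 0) := rfl

theorem bf_one (Bv : List Int) : bf Bv 1 = 0 := by
  have := bf_le Bv 1; omega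

-- invariant of the pmt-building fold
theorem buildPmt_invariant (Bv : List Int) (n : Nat) (hn : n = Bv.length) :
    ∀ m, m ≤ n - 1 →
      ((List.range' 1 m).foldl (pvStep Bv) (List.replicate n 0)).length = n ∧
      ∀ i, i ≤ m → ((List.range' 1 m).foldl (pvStep Bv) (List.replicate n 0)).getD i 0 = bf Bv (i + 1) := by
  intro m
  induction m with
  | zero =>
    intro _
    constructor
    · simp
    · intro i hi
      interval_cases i
      have hb := bf_one Bv
      by_cases h : 0 < n
      · simp [List.getD_eq_getElem?_getD, h, hb]
      · simp at h
        subst h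
        simp [List.getD, hb]
  | succ m IHm =>
    intro hm
    have hm' : m ≤ n - 1 := by omega
    obtain ⟨hlen, hvals⟩ := IHm hm'
    set pmt := (List.range' 1 m).foldl (pvStep Bv) (List.replicate n 0) with hpmt
    have hrange : List.range' 1 (m + 1) = List.range' 1 m ++ [1 + m] := List.range'_1_concat
    have hfold : (List.range' 1 (m + 1)).foldl (pvStep Bv) (List.replicate n 0)
        = pvStep Bv pmt (1 + m) := by
      rw [hrange, List.foldl_append]
      simp [hpmt]
    set i := 1 + m with hi
    have hin : i < n := by omega
    have hin' : i < Bv.length := by omega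
    -- pmt is good up to index i - 1 = m
    have hgood : GoodPmt Bv pmt (bf Bv i) := by
      intro m' h1 h2
      have : m' - 1 ≤ m := by
        have := bf_le Bv i
        omega
      rw [hvals (m' - 1) this]
      congr 1
      omega
    have hji : pmt.getD (i - 1) 0 = bf Bv i := by
      rw [show i - 1 = m by omega, hvals m le_rfl]
      congr 1
      omega
    have hbfi_lt : bf Bv i < Bv.length := by
      have := bf_le Bv i
      omega
    -- apply jump_spec with t = Bv.take i, c = Bv.getD i 0, cap = i - 1
    have hspec := jump_spec Bv pmt (Bv.getD i 0) (i - 1) (by omega) (bf Bv i) hbfi_lt hgood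
      (Bv.take i) (bf_suffix Bv i)
      (by
        intro k hk1 hk2 _
        exact bf_greatest Bv i k hk1 hk2)
    set r := pvJump Bv pmt (Bv.getD i 0) (bf Bv i) with hr
    have hrle : r ≤ bf Bv i := hspec.1
    have htsucc : Bv.take i ++ [Bv.getD i 0] = Bv.take (i + 1) := (take_succ_getD Bv i hin').symm
    -- the new pmt value at index i equals bf Bv (i+1)
    have hnewval : (if Bv.getD i 0 = Bv.getD r 0 then r + 1 else r) = bf Bv (i + 1) := by
      by_cases hc : Bv.getD i 0 = Bv.getD r 0
      · simp only [hc, if_pos]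
        have h1 := (hspec.2.1 hc.symm)
        rw [htsucc] at h1
        have hub : bf Bv (i + 1) ≤ r + 1 := by
          have hsp := bf_suffix Bv (i + 1)
          have hble := bf_le Bv (i + 1)
          exact h1.2 (bf Bv (i+1)) (by omega) hsp
        have hlb : r + 1 ≤ bf Bv (i + 1) := by
          apply bf_greatest Bv (i + 1) (r + 1) (by have := bf_le Bv i; omega)
          exact h1.1
        omega
      · simp only [hc, if_neg, not_false_iff]
        have h1 := (hspec.2.2 (fun h => hc h.symm))
        rw [htsucc] at h1
        have hub : bf Bv (i + 1) = 0 := by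
          have hsp := bf_suffix Bv (i + 1)
          have hble := bf_le Bv (i + 1)
          exact h1.2 (bf Bv (i+1)) (by omega) hsp
        omega
    rw [hfold]
    unfold pvStep
    simp only [← hr, hji]
    constructor
    · simp [hlen]
    · intro i' hi'
      by_cases hii : i' = i
      · subst hii
        rw [List.getD_eq_getElem?_getD, List.getElem?_set_self (by omega)]
        simpa using hnewval
      · have hi'm : i' ≤ m := by omega
        rw [List.getD_eq_getElem?_getD, List.getElem?_set_ne (by omega)]
        rw [← List.getD_eq_getElem?_getD]
        exact hvals i' hi'm

theorem buildPmt_good (Bv : List Int) (n : Nat) (hn : n = Bv.length) :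
    GoodPmt Bv (pvBuildPmt Bv n) n := by
  intro m h1 h2
  have := (buildPmt_invariant Bv n hn (n - 1) le_rfl).2 (m - 1) (by omega)
  rw [pvBuildPmt_eq]
  rw [this]
  congr 1
  omega

-- indexing the doubled text
theorem doubled_getD (Av : List Int) (i : Nat) (_hn : 0 < Av.length)
    (hi : i < 2 * Av.length) :
    (Av ++ Av).getD i 0 = Av.getD (i % Av.length) 0 := by
  by_cases h : i < Av.length
  · rw [Nat.mod_eq_of_lt h]
    simp [List.getD_eq_getElem?_getD, List.getElem?_append_left h]
  · have h1 : Av.length ≤ i := by omega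
    have h2 : i % Av.length = i - Av.length := by
      rw [Nat.mod_eq_sub_mod h1, Nat.mod_eq_of_lt (by omega)]
    rw [h2]
    simp [List.getD_eq_getElem?_getD, List.getElem?_append_right h1]

-- search-loop invariant
theorem search_spec (Av Bv : List Int) (pmt : List Nat) (n : Nat)
    (hn : n = Bv.length) (hA : Av.length = n) (hpos : 0 < n)
    (hgoodfull : GoodPmt Bv pmt n) :
    ∀ d i j, 2 * n - i = d → i ≤ 2 * n → j < n →
    Bv.take j <:+ (Av ++ Av).take i →
    (∀ k, k ≤ n → Bv.take k <:+ (Av ++ Av).take i → k ≤ j) →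
    (pvSearch Av Bv pmt n i j = true ↔
      ∃ p, i < p ∧ p ≤ 2 * n ∧ Bv <:+ (Av ++ Av).take p) := by
  intro d
  induction d with
  | zero =>
    intro i j hd hi _ _ _
    have : i = 2 * n := by omega
    subst this
    rw [pvSearch]
    simp only [lt_irrefl, dite_false]
    constructor
    · intro h; exact absurd h (by simp)
    · rintro ⟨p, h1, h2, _⟩; omega
  | succ d IHd =>
    intro i j hd hi hjn hsfx hmax
    have hilt : i < 2 * n := by omega
    have hiT : i < (Av ++ Av).length := by simp [hA]; omega
    set c := Av.getD (i % n) 0 with hc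
    have hcT : c = (Av ++ Av).getD i 0 := by
      rw [hc, ← hA] at *
      exact (doubled_getD Av i (by omega) (by omega)).symm
    have htsucc : (Av ++ Av).take i ++ [c] = (Av ++ Av).take (i + 1) := by
      rw [hcT]
      exact (take_succ_getD _ i hiT).symm
    have hgoodj : GoodPmt Bv pmt j := fun m h1 h2 => hgoodfull m h1 (by omega)
    have hspec := jump_spec Bv pmt c (n - 1) (by omega) j (by omega) hgoodj
      ((Av ++ Av).take i) hsfx
      (fun k hk1 hk2 _ => hmax k (by omega) hk2)
    set r := pvJump Bv pmt c j with hr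
    have hrle : r ≤ j := hspec.1
    have hcap1 : n - 1 + 1 = n := by omega
    rw [pvSearch]
    simp only [hilt, dite_true, ← hc, ← hr]
    by_cases hmatch : c = Bv.getD r 0
    · simp only [hmatch, if_pos]
      have h1 := hspec.2.1 hmatch.symm
      rw [htsucc, hcap1] at h1
      by_cases hlast : r = n - 1
      · -- full match at i+1
        simp only [hlast, if_pos]
        have hfull : Bv <:+ (Av ++ Av).take (i + 1) := by
          have := h1.1
          rwa [hlast, show n - 1 + 1 = n by omega, hn, List.take_length] at this
        constructor
        · intro _; exact ⟨i + 1, by omega, by omega, hfull⟩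
        · intro _; trivial
      · simp only [hlast, if_neg, not_false_iff]
        have hr1n : r + 1 < n := by omega
        have hnomatch : ¬ Bv <:+ (Av ++ Av).take (i + 1) := by
          intro h
          have := h1.2 n le_rfl (by rwa [hn, List.take_length])
          omega
        rw [IHd (i + 1) (r + 1) (by omega) (by omega) hr1n h1.1 (fun k hk1 hk2 => h1.2 k hk1 hk2)]
        constructor
        · rintro ⟨p, hp1, hp2, hp3⟩; exact ⟨p, by omega, hp2, hp3⟩
        · rintro ⟨p, hp1, hp2, hp3⟩
          refine ⟨p, ?_, hp2, hp3⟩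
          rcases Nat.lt_or_ge (i + 1) p with h | h
          · exact h
          · have : p = i + 1 := by omega
            subst this
            exact absurd hp3 hnomatch
    · simp only [hmatch, if_neg, not_false_iff]
      have h1 := hspec.2.2 (fun h => hmatch h.symm)
      rw [htsucc, hcap1] at h1
      have hr0 : r = 0 := h1.1
      have hnomatch : ¬ Bv <:+ (Av ++ Av).take (i + 1) := by
        intro h
        have := h1.2 n le_rfl (by rwa [hn, List.take_length])
        omega
      rw [hr0]
      rw [IHd (i + 1) 0 (by omega) (by omega) hpos (by simp)
        (fun k hk1 hk2 => by rw [h1.2 k hk1 hk2])]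
      constructor
      · rintro ⟨p, hp1, hp2, hp3⟩; exact ⟨p, by omega, hp2, hp3⟩
      · rintro ⟨p, hp1, hp2, hp3⟩
        refine ⟨p, ?_, hp2, hp3⟩
        rcases Nat.lt_or_ge (i + 1) p with h | h
        · exact h
        · have : p = i + 1 := by omega
          subst this
          exact absurd hp3 hnomatch

-- existence of a match ending position ↔ B is an infix of A ++ A
theorem match_iff_infix (Av Bv : List Int) (n : Nat) (hn : n = Bv.length)
    (hA : Av.length = n) (hpos : 0 < n) :
    (∃ p, 0 < p ∧ p ≤ 2 * n ∧ Bv <:+ (Av ++ Av).take p) ↔ Bv <:+: Av ++ Av := by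
  constructor
  · rintro ⟨p, _, _, h⟩
    exact h.isInfix.trans (List.take_prefix p (Av ++ Av)).isInfix
  · rintro ⟨s, u, hsu⟩
    refine ⟨s.length + n, by omega, ?_, ?_⟩
    · have hl := congrArg List.length hsu
      simp only [List.length_append] at hl
      omega
    · have hT : (Av ++ Av).take (s.length + n) = s ++ Bv := by
        rw [← hsu]
        have hsl : (s ++ Bv).length = s.length + n := by simp [← hn]
        rw [← hsl, List.take_left]
      rw [hT]
      exact List.suffix_append s Bv

-- infix of the doubled list ↔ some rotation equals B
theorem infix_iff_rotation (Av Bv : List Int) (n : Nat) (hn : n = Bv.length)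
    (hA : Av.length = n) (hpos : 0 < n) :
    Bv <:+: Av ++ Av ↔ ∃ i, i < n ∧ Av.drop i ++ Av.take i = Bv := by
  constructor
  · rintro ⟨s, u, hsu⟩
    set q := s.length with hq
    have hlen : q + n + u.length = 2 * n := by
      have hl := congrArg List.length hsu
      simp only [List.length_append] at hl
      omega
    have hqn : q ≤ n := by omega
    have hdropq : (Av ++ Av).drop q = Bv ++ u := by
      rw [← hsu, List.append_assoc, List.drop_left' hq.symm]
    by_cases hqe : q = n
    · -- second copy: B = A, rotation index 0
      refine ⟨0, hpos, ?_⟩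
      have h1 : (Av ++ Av).drop q = Av := by
        rw [hqe, ← hA, List.drop_left]
      have h2 : Av = Bv ++ u := h1 ▸ hdropq
      have hu : u = [] := by
        have := congrArg List.length h2
        simp [hA, hn] at this
        simpa using List.length_eq_zero_iff.mp (by omega)
      simp [h2, hu]
    · have hq_lt : q < n := by omega
      refine ⟨q, hq_lt, ?_⟩
      have h1 : (Av ++ Av).drop q = Av.drop q ++ Av := by
        rw [List.drop_append_of_le_length (by omega)]
      have h2 : Av.drop q ++ Av = Bv ++ u := h1 ▸ hdropq
      have hlen2 : (Av.drop q).length = n - q := by simp [hA]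
      -- take n of both sides
      have h3 := congrArg (List.take n) h2
      rw [List.take_append, List.take_append, hlen2,
        List.take_of_length_le (by rw [hlen2]; omega),
        show n - (n - q) = q by omega,
        List.take_of_length_le (by omega : Bv.length ≤ n),
        show n - Bv.length = 0 by omega, List.take_zero, List.append_nil] at h3
      exact h3
  · rintro ⟨i, hi, hrot⟩
    refine ⟨Av.take i, Av.drop i, ?_⟩
    rw [← hrot]
    simp only [← List.append_assoc]
    rw [List.take_append_drop, List.append_assoc, List.take_append_drop]

-- ===== VERDICT (by name: the statement is the Claim_ definition above) =====
theorem rownowazne_cyklicznie_spec : Claim_equal_rownowazne_cyklicznie := by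
  intro A B _
  unfold Spec_rownowazne_cyklicznie rownowazne_cyklicznie rownowazne_cyklicznie_alt
  by_cases hlen : A.length ≠ B.length
  · rw [if_pos hlen, if_pos hlen]
  · rw [if_neg hlen, if_neg hlen]
    rw [Decidable.not_not] at hlen
    set n := A.length with hnA
    rcases Nat.eq_zero_or_pos n with hn0 | hpos
    · rw [pvSearch, dif_neg (by omega)]
      simp [hn0]
    · have hsearch := search_spec A B (pvBuildPmt B n) n hlen hnA.symm hpos
        (buildPmt_good B n hlen) (2 * n) 0 0 (by omega) (by omega) hpos (by simp)
        (fun k hk1 hk2 => by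
          simpa using take_eq_nil_of_suffix_nil B k (by omega) (by simpa using hk2))
      rw [Bool.eq_iff_iff, hsearch, match_iff_infix A B n hlen hnA.symm hpos,
        infix_iff_rotation A B n hlen hnA.symm hpos]
      simp only [List.any_eq_true, List.mem_range, beq_iff_eq]
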